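-- pv_equiv track=rewrite | github.com/kezzayuno/summerTutoringSolutions | phonesimulator.py | checkPhoneNumber
-- ===== SOURCE A (Python) =====
-- def checkPhoneNumber(phoneBook, name):
--     for phoneName in phoneBook.keys():
--         if phoneName == name:
--             return phoneBook[phoneName]
--         if ',' in phoneName:
--             splitNames = phoneName.split(',')
--             for aName in splitNames:
--                 if name == aName:
--                     return phoneBook[phoneName]
--     return "This name does not exist in this phone book."
-- ===== SOURCE B (Python) =====
-- def checkPhoneNumber(phoneBook, name):
--     index = {}
--     for key, value in phoneBook.items():
--         for alias in [key] + (key.split(',') if ',' in key else []):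
--             if alias not in index:
--                 index[alias] = value
--     return index.get(name, "This name does not exist in this phone book.")
-- ===== Notes on version B (the rewrite author's own statement) =====
-- stated objective: alternative
-- what changed: A scans the keys with early return, splitting comma keys as it goes; B builds an alias-to-number dictionary once (full key plus its comma-split parts, first key wins) and answers with a single dict lookup.
import Mathlib
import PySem

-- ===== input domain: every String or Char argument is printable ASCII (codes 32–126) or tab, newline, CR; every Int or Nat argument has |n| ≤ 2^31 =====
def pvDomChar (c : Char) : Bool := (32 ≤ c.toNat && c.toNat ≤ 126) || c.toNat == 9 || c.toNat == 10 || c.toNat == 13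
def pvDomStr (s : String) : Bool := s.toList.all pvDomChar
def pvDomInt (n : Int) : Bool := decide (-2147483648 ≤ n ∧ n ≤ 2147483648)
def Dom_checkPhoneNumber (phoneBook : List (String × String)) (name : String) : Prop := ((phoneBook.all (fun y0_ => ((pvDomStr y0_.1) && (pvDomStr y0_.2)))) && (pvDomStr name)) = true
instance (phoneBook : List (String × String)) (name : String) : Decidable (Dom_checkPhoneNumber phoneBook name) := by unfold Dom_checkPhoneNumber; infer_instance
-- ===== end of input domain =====

-- B replaces A's early-returning scan over the keys by building an alias→number index once
-- and doing a single dictionary lookup (objective: alternative decomposition, same cost).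

-- ===== PORT A =====
-- literal port of A's loop: for phoneName in phoneBook.keys(): …
def pvGoA (d : PySem.Dict String String) : List String → String → String
  | [], _ => "This name does not exist in this phone book."
  | k :: ks, name =>
    if k == name then (d.get? k).getD ""            -- phoneBook[phoneName], key is present
    else if PySem.Str.isIn "," k then
      let splitNames := (PySem.Str.split? k ",").getD []
      if splitNames.contains name then (d.get? k).getD ""
      else pvGoA d ks name
    else pvGoA d ks name

def checkPhoneNumber (phoneBook : List (String × String)) (name : String) : String :=
  let d := PySem.Dict.ofList phoneBook
  pvGoA d (PySem.Dict.keys d) name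

-- ===== PORT B =====
def pvAliases (k : String) : List String :=
  [k] ++ (if PySem.Str.isIn "," k then (PySem.Str.split? k ",").getD [] else [])

def pvIndexStep (index : PySem.Dict String String) (kv : String × String) : PySem.Dict String String :=
  (pvAliases kv.1).foldl (fun idx a => if idx.contains a then idx else idx.insert a kv.2) index

def checkPhoneNumber_alt (phoneBook : List (String × String)) (name : String) : String :=
  let index := (PySem.Dict.ofList phoneBook).items.foldl pvIndexStep PySem.Dict.empty
  PySem.Dict.getD index name "This name does not exist in this phone book."

-- ===== PRECONDITION & SPEC =====
def Spec_checkPhoneNumber (phoneBook : List (String × String)) (name : String) (out : String) : Prop := out = checkPhoneNumber_alt phoneBook name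
instance (phoneBook : List (String × String)) (name : String) (out : String) : Decidable (Spec_checkPhoneNumber phoneBook name out) := by unfold Spec_checkPhoneNumber; infer_instance

-- ===== CLAIM (what is proved, stated in full; the proofs are below) =====
def Claim_equal_checkPhoneNumber : Prop := ∀ (phoneBook : List (String × String)) (name : String), Dom_checkPhoneNumber phoneBook name → Spec_checkPhoneNumber phoneBook name (checkPhoneNumber phoneBook name)

-- ===== LEMMAS AND PROOFS =====

-- "key k provides alias `name`" — the condition under which A's loop body returns at k
def pvProvide (k name : String) : Bool :=
  k == name || (PySem.Str.isIn "," k && ((PySem.Str.split? k ",").getD []).contains name)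

-- first value provided for `name` while scanning the items left to right
def pvScan? : List (String × String) → String → Option String
  | [], _ => none
  | p :: t, n => if pvProvide p.1 n then some p.2 else pvScan? t n

theorem pvBeqSwap (k name : String) : (k == name) = decide (name = k) := by
  by_cases e : name = k
  · subst e; simp
  · rw [beq_eq_false_iff_ne.mpr (Ne.symm e), decide_eq_false e]

theorem pvAliases_contains (k name : String) :
    (pvAliases k).contains name = pvProvide k name := by
  cases h : PySem.Str.isIn "," k <;>
    simp [pvAliases, pvProvide, pvBeqSwap]

theorem pvInner_get? (as : List String) (idx : PySem.Dict String String) (v name : String) :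
    (as.foldl (fun idx a => if idx.contains a then idx else idx.insert a v) idx).get? name
      = (idx.get? name).or (if as.contains name then some v else none) := by
  induction as generalizing idx with
  | nil => simp
  | cons a t ih =>
    rw [List.foldl_cons, ih]
    by_cases h : a = name
    · subst h
      cases hg : idx.get? a with
      | some w =>
        have hc : idx.contains a = true := by
          rw [PySem.Dict.contains_eq_isSome_get?, hg]; rfl
        simp [hc, hg, Option.or]
      | none =>
        have hc : idx.contains a = false := by
          rw [PySem.Dict.contains_eq_isSome_get?, hg]; rfl
        simp [hc, PySem.Dict.get?_insert_self, Option.or]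
    · have hb' : (name == a) = false := beq_eq_false_iff_ne.mpr (Ne.symm h)
      have hstep : (if idx.contains a then idx else idx.insert a v).get? name = idx.get? name := by
        split
        · rfl
        · exact PySem.Dict.get?_insert_of_ne _ _ (Ne.symm h)
      rw [hstep]
      rw [List.contains_cons, hb']
      simp

theorem pvIndex_get? (l : List (String × String)) (idx : PySem.Dict String String) (name : String) :
    (l.foldl pvIndexStep idx).get? name = (idx.get? name).or (pvScan? l name) := by
  induction l generalizing idx with
  | nil => simp [pvScan?]
  | cons p t ih =>
    rw [List.foldl_cons, ih]
    show ((pvIndexStep idx p).get? name).or (pvScan? t name) = _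
    rw [pvIndexStep, pvInner_get?, pvAliases_contains, Option.or_assoc]
    congr 1
    cases h : pvProvide p.1 name <;> simp [pvScan?, h, Option.or]

theorem pvGoA_eq_scan (l : List (String × String)) (d : PySem.Dict String String) (name : String)
    (h : ∀ p ∈ l, d.get? p.1 = some p.2) :
    pvGoA d (l.map Prod.fst) name
      = (pvScan? l name).getD "This name does not exist in this phone book." := by
  induction l with
  | nil => simp [pvGoA, pvScan?]
  | cons p t ih =>
    have hp : d.get? p.1 = some p.2 := h p (List.mem_cons_self ..)
    have ht := ih (fun q hq => h q (List.mem_cons_of_mem _ hq))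
    simp only [List.map_cons, pvGoA, pvScan?]
    cases h1 : (p.1 == name) <;> cases h2 : PySem.Str.isIn "," p.1 <;>
      cases h3 : ((PySem.Str.split? p.1 ",").getD []).contains name <;>
      simp [pvProvide, h1, hp, ht] <;> simp_all

-- ===== VERDICT (by name: the statement is the Claim_ definition above) =====
theorem checkPhoneNumber_spec : Claim_equal_checkPhoneNumber := by
  intro phoneBook name _
  show pvGoA (PySem.Dict.ofList phoneBook) (PySem.Dict.keys (PySem.Dict.ofList phoneBook)) name
      = PySem.Dict.getD ((PySem.Dict.ofList phoneBook).items.foldl pvIndexStep PySem.Dict.empty)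
          name "This name does not exist in this phone book."
  have hnd : (PySem.Dict.ofList phoneBook).keys.Nodup := PySem.Dict.nodup_keys_ofList phoneBook
  generalize hE : PySem.Dict.ofList phoneBook = d at hnd ⊢
  rw [show PySem.Dict.keys d = d.items.map Prod.fst from rfl,
      pvGoA_eq_scan d.items d name (fun p hp => by obtain ⟨k, v⟩ := p; exact PySem.Dict.get?_of_mem_items _ hp hnd),
      PySem.Dict.getD_eq_get?_getD, pvIndex_get?, PySem.Dict.get?_empty]
  rfl
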